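-- pv_equiv track=rewrite | github.com/fatcrapinmybutt/fredprime-legal-system | tools/adversarial_signal_suite/LITIGATIONOS_ADVERSARIAL_SIGNAL_SUITE_v2_2.py | locator_for_span
-- ===== SOURCE A (Python) =====
-- from typing import Any, Dict, Iterable, List, Optional, Tuple
--
-- def line_index_map(text: str) -> List[int]:
--     line_starts = [0]
--     for idx, ch in enumerate(text):
--         if ch == "\n":
--             line_starts.append(idx + 1)
--     return line_starts
--
-- def locator_for_span(text: str, start: int, end: int) -> str:
--     line_starts = line_index_map(text)
--     start_line = 1
--     end_line = 1
--     for i, pos in enumerate(line_starts, start=1):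
--         if pos <= start:
--             start_line = i
--         if pos <= end:
--             end_line = i
--     return f"line:{start_line}-{end_line}"
-- ===== SOURCE B (Python) =====
-- def locator_for_span(text: str, start: int, end: int) -> str:
--     start_line = text.count("\n", 0, max(start, 0)) + 1
--     end_line = text.count("\n", 0, max(end, 0)) + 1
--     return f"line:{start_line}-{end_line}"
-- ===== Notes on version B (the rewrite author's own statement) =====
-- stated objective: simpler
-- what changed: Instead of building the list of line-start offsets and scanning it with enumerate to find the last start <= each endpoint, B counts the newlines before each clamped endpoint with str.count("\n", 0, max(x, 0)) and adds 1.
import Mathlib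
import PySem

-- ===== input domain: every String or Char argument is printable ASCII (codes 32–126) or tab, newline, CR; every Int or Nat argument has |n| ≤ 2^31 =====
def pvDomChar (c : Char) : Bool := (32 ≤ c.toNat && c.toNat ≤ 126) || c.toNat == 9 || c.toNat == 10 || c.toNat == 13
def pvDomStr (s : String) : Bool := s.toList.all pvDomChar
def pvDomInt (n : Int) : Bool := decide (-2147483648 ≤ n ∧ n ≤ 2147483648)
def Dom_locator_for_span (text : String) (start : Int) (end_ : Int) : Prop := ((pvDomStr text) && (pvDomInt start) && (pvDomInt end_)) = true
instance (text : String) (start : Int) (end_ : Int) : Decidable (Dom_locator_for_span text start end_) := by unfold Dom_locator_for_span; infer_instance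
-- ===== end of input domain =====

-- B replaces the line-start-offset list and its enumerate scan by directly counting
-- newlines before each (clamped) span endpoint: simpler, one formula per endpoint.


-- ===== PORT A =====
def line_index_map (text : String) : List Int :=
  (PySem.List.enumerate text.toList 0).foldl
    (fun line_starts p => if p.2 = '\n' then line_starts ++ [p.1 + 1] else line_starts)
    [(0 : Int)]

def locator_for_span (text : String) (start : Int) (end_ : Int) : String :=
  let line_starts := line_index_map text
  let r := (PySem.List.enumerate line_starts 1).foldl
    (fun (acc : Int × Int) p =>
      (if p.2 ≤ start then p.1 else acc.1, if p.2 ≤ end_ then p.1 else acc.2))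
    (1, 1)
  "line:" ++ PySem.Int.toStr r.1 ++ "-" ++ PySem.Int.toStr r.2

-- ===== PORT B =====
-- text.count("\n", 0, m) with m = max(x,0): a one-char needle with bounds [0, m) is
-- exactly the number of '\n' among the first m characters (exact: bounds are clamped
-- by Python the same way List.take clamps).
def nlBefore (text : String) (x : Int) : Int :=
  ((text.toList.take (max x 0).toNat).count '\n' : Int)

def locator_for_span_alt (text : String) (start : Int) (end_ : Int) : String :=
  let start_line := nlBefore text start + 1
  let end_line := nlBefore text end_ + 1
  "line:" ++ PySem.Int.toStr start_line ++ "-" ++ PySem.Int.toStr end_line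

-- ===== PRECONDITION & SPEC =====
def Spec_locator_for_span (text : String) (start : Int) (end_ : Int) (out : String) : Prop := out = locator_for_span_alt text start end_
instance (text : String) (start : Int) (end_ : Int) (out : String) : Decidable (Spec_locator_for_span text start end_ out) := by unfold Spec_locator_for_span; infer_instance

-- ===== CLAIM (what is proved, stated in full; the proofs are below) =====
def Claim_equal_locator_for_span : Prop := ∀ (text : String) (start : Int) (end_ : Int), Dom_locator_for_span text start end_ → Spec_locator_for_span text start end_ (locator_for_span text start end_)

-- ===== LEMMAS AND PROOFS =====

-- the positions after each newline of cs, when cs begins at absolute index j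
def nlStarts : List Char → Int → List Int
  | [], _ => []
  | c :: cs, j => (if c = '\n' then [j + 1] else []) ++ nlStarts cs (j + 1)

-- single-component version of A's second loop (index i, running value v, threshold s)
def gScan (s : Int) : List Int → Int → Int → Int
  | [], _, v => v
  | p :: ps, i, v => gScan s ps (i + 1) (if p ≤ s then i else v)

theorem line_index_foldl (cs : List Char) (j : Int) (acc : List Int) :
    (PySem.List.enumerate cs j).foldl
      (fun line_starts p => if p.2 = '\n' then line_starts ++ [p.1 + 1] else line_starts) acc
    = acc ++ nlStarts cs j := by
  induction cs generalizing j acc with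
  | nil => simp [PySem.List.enumerate_nil, nlStarts]
  | cons c cs ih =>
    rw [PySem.List.enumerate_cons]
    simp only [List.foldl_cons, nlStarts]
    by_cases h : c = '\n' <;> simp [h, ih, List.append_assoc]

theorem pair_foldl (start end_ : Int) (ls : List Int) (i a b : Int) :
    (PySem.List.enumerate ls i).foldl
      (fun (acc : Int × Int) p =>
        (if p.2 ≤ start then p.1 else acc.1, if p.2 ≤ end_ then p.1 else acc.2)) (a, b)
    = (gScan start ls i a, gScan end_ ls i b) := by
  induction ls generalizing i a b with
  | nil => simp [PySem.List.enumerate_nil, gScan]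
  | cons p ps ih => rw [PySem.List.enumerate_cons]; simp [gScan, ih]

theorem gScan_frozen (s : Int) (cs : List Char) (j i v : Int) (h : s ≤ j) :
    gScan s (nlStarts cs j) i v = v := by
  induction cs generalizing j i v with
  | nil => simp [nlStarts, gScan]
  | cons c cs ih =>
    unfold nlStarts
    by_cases hc : c = '\n'
    · rw [if_pos hc, List.singleton_append]
      unfold gScan
      rw [if_neg (by omega : ¬ (j + 1 ≤ s))]
      exact ih (j + 1) (i + 1) v (by omega)
    · rw [if_neg hc, List.nil_append]
      exact ih (j + 1) i v (by omega)

theorem gScan_active (s : Int) (cs : List Char) (j i : Int) (h : j ≤ s) :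
    gScan s (nlStarts cs j) i (i - 1)
      = i - 1 + ((cs.take (s - j).toNat).count '\n' : Int) := by
  induction cs generalizing j i with
  | nil => simp [nlStarts, gScan]
  | cons c cs ih =>
    unfold nlStarts
    have htk1 : j + 1 ≤ s → (s - j).toNat = (s - (j + 1)).toNat + 1 := by omega
    by_cases hc : c = '\n'
    · rw [if_pos hc, List.singleton_append]
      unfold gScan
      by_cases hle : j + 1 ≤ s
      · rw [if_pos hle]
        have hi := ih (j + 1) (i + 1) hle
        rw [show (i + 1 : Int) - 1 = i by ring] at hi
        rw [hi, htk1 hle, List.take_succ_cons, List.count_cons]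
        subst hc
        simp
      · rw [if_neg hle]
        rw [gScan_frozen s cs (j + 1) (i + 1) (i - 1) (by omega)]
        rw [show (s - j).toNat = 0 by omega]
        simp
    · rw [if_neg hc, List.nil_append]
      by_cases hle : j + 1 ≤ s
      · rw [ih (j + 1) i hle, htk1 hle, List.take_succ_cons, List.count_cons]
        have hcb : (c == '\n') = false := by simpa using hc
        simp [hcb]
      · rw [gScan_frozen s cs (j + 1) i (i - 1) (by omega)]
        rw [show (s - j).toNat = 0 by omega]
        simp

theorem gScan_main (s : Int) (cs : List Char) :
    gScan s ((0 : Int) :: nlStarts cs 0) 1 1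
      = ((cs.take (max s 0).toNat).count '\n' : Int) + 1 := by
  unfold gScan
  by_cases hs : (0 : Int) ≤ s
  · rw [if_pos hs]
    have hi := gScan_active s cs 0 (1 + 1) hs
    rw [show (1 + 1 : Int) - 1 = 1 by ring] at hi
    rw [hi, show max s 0 = s by omega, show s - 0 = s by ring]
    ring
  · rw [if_neg hs]
    rw [gScan_frozen s cs 0 (1 + 1) 1 (by omega)]
    rw [show (max s 0).toNat = 0 by omega]
    simp

-- ===== VERDICT (by name: the statement is the Claim_ definition above) =====
theorem locator_for_span_spec : Claim_equal_locator_for_span := by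
  intro text start end_ _
  unfold Spec_locator_for_span locator_for_span locator_for_span_alt line_index_map nlBefore
  rw [line_index_foldl text.toList 0 [(0 : Int)]]
  simp only [List.singleton_append]
  rw [pair_foldl]
  rw [gScan_main start text.toList, gScan_main end_ text.toList]
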